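-- pv_equiv track=rewrite | github.com/mylesrankin/210CT-Coursework | week5-task1.py | selectHighest
-- ===== SOURCE A (Python) =====
-- def selectHighest(array): # function to select highest sub sequence in 2d array
--     arrayLen = 0 # set array length 0 as default
--     highestSequences = [] # create a new array to handle highest sequences
--     for i in array: # for each item in input array
--         if len(i) > arrayLen:
--             arrayLen = len(i) # sets array length if higher than current
--             highestSequences = [] # flushes current highestSequences
--             highestSequences.append(i) # appends new highest sequence
--         elif len(i) == arrayLen: # if two sub-s are the same size
--             highestSequences.append(i) # just appends not flush if size is equal
--     return(highestSequences) # returns the highest sequences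
-- ===== SOURCE B (Python) =====
-- def selectHighest(array):
--     m = max((len(i) for i in array), default=0)
--     return [i for i in array if len(i) == m]
-- ===== Notes on version B (the rewrite author's own statement) =====
-- stated objective: simpler
-- what changed: Replaces the running-max-with-flush accumulator loop by compute-max-then-filter: one pass to find the maximum sublist length, a comprehension keeping sublists of that length.
import Mathlib
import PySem

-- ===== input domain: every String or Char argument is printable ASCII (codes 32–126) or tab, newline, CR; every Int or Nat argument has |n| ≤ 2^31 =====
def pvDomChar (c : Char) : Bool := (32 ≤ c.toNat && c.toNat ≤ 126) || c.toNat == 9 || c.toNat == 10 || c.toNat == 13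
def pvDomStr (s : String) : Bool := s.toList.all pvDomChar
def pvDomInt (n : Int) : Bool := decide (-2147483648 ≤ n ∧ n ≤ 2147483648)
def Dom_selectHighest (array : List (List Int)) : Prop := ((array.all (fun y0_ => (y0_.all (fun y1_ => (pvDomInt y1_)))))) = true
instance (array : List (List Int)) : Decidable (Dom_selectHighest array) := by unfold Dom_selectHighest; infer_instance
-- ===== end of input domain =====

-- B replaces A's running-max-with-flush accumulator loop by compute-max-then-filter (simpler; same cost).

-- ===== PORT A =====
-- running state: (arrayLen, highestSequences); flush and restart on a strictly longer sublist
def selectHighest (array : List (List Int)) : List (List Int) :=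
  (array.foldl (fun (st : Nat × List (List Int)) i =>
      if i.length > st.1 then (i.length, [i])
      else if i.length = st.1 then (st.1, st.2 ++ [i])
      else st) (0, [])).2

-- ===== PORT B =====
-- m = max((len(i) for i in array), default=0)
def maxLenB (array : List (List Int)) : Nat :=
  array.foldl (fun m i => max m i.length) 0
-- [i for i in array if len(i) == m]
def selectHighest_alt (array : List (List Int)) : List (List Int) :=
  array.filter (fun i => i.length == maxLenB array)

-- ===== PRECONDITION & SPEC =====
def Spec_selectHighest (array : List (List Int)) (out : List (List Int)) : Prop := out = selectHighest_alt array
instance (array : List (List Int)) (out : List (List Int)) : Decidable (Spec_selectHighest array out) := by unfold Spec_selectHighest; infer_instance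

-- ===== CLAIM (what is proved, stated in full; the proofs are below) =====
def Claim_equal_selectHighest : Prop := ∀ (array : List (List Int)), Dom_selectHighest array → Spec_selectHighest array (selectHighest array)

-- ===== LEMMAS AND PROOFS =====

-- m never decreases along A's running max
theorem le_foldl_maxLen (t : List (List Int)) (m : Nat) :
    m ≤ t.foldl (fun m i => max m i.length) m := by
  rw [show t.foldl (fun m i => max m i.length) m = (t.map List.length).foldl max m from
    List.foldl_map.symm]
  exact (PySem.List.le_foldl_max _ _).1

-- Invariant of A's loop: from state (m, acc) it produces the max M of m and the lengths,
-- and the acc (kept only if no flush happened, i.e. M = m) followed by the sublists of length M.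
theorem selectHighest_fold_inv (l : List (List Int)) :
    ∀ (m : Nat) (acc : List (List Int)),
      l.foldl (fun (st : Nat × List (List Int)) i =>
          if i.length > st.1 then (i.length, [i])
          else if i.length = st.1 then (st.1, st.2 ++ [i])
          else st) (m, acc)
      = (l.foldl (fun m i => max m i.length) m,
         (if l.foldl (fun m i => max m i.length) m = m then acc else [])
           ++ l.filter (fun i => i.length == l.foldl (fun m i => max m i.length) m)) := by
  induction l with
  | nil => intro m acc; simp
  | cons i t ih =>
    intro m acc
    simp only [List.foldl_cons]
    by_cases hgt : i.length > m
    · rw [if_pos hgt, ih]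
      have hm : max m i.length = i.length := by omega
      simp only [hm]
      have hM : i.length ≤ t.foldl (fun m i => max m i.length) i.length :=
        le_foldl_maxLen t i.length
      have hne : t.foldl (fun m i => max m i.length) i.length ≠ m := by omega
      rw [if_neg hne]
      by_cases he : t.foldl (fun m i => max m i.length) i.length = i.length
      · simp [he]
      · have : (i.length == t.foldl (fun m i => max m i.length) i.length) = false := by
          simp [Ne.symm he]
        simp [this, he]
    · rw [if_neg hgt]
      by_cases heq : i.length = m
      · rw [if_pos heq, ih]
        have hm : max m i.length = m := by omega
        simp only [hm]
        by_cases hM : t.foldl (fun m i => max m i.length) m = m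
        · simp [hM, heq]
        · have : (i.length == t.foldl (fun m i => max m i.length) m) = false := by
            simp [heq]; exact fun h => hM h.symm
          simp [hM, this]
      · rw [if_neg heq, ih]
        have hm : max m i.length = m := by omega
        simp only [hm]
        have hM : m ≤ t.foldl (fun m i => max m i.length) m :=
          le_foldl_maxLen t m
        have : (i.length == t.foldl (fun m i => max m i.length) m) = false := by
          simp; omega
        simp [this]

-- ===== VERDICT (by name: the statement is the Claim_ definition above) =====
theorem selectHighest_spec : Claim_equal_selectHighest := by
  intro array _
  unfold Spec_selectHighest selectHighest selectHighest_alt maxLenB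
  rw [selectHighest_fold_inv]
  by_cases h : array.foldl (fun m i => max m i.length) 0 = 0 <;> simp [h]
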